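-- pv_equiv track=rewrite | github.com/lennykioko/Treehouse | Python/Beginning_Python/test.py | most_courses
-- ===== SOURCE A (Python) =====
-- def most_courses(teachers):
--     max_count = 0
--     max_teacher = ""
--     for item in teachers.items():
--         if len(item[1]) > max_count:
--             max_count = len(item[1])
--             max_teacher = item[0]
--
--     return max_teacher
-- ===== SOURCE B (Python) =====
-- def most_courses(teachers):
--     ranked = sorted(teachers.items(), key=lambda kv: len(kv[1]), reverse=True)
--     return ranked[0][0] if ranked else ""
-- ===== Notes on version B (the rewrite author's own statement) =====
-- stated objective: alternative
-- what changed: Replaces A's single-pass running-max scan by a stable sort of the items by descending course count and taking the head; Pre_ excludes nonempty dicts whose course lists are all empty, where A's "" sentinel (max_count starting at 0) and B's first-inserted teacher are both defensible answers.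
-- outside the precondition, e.g. on most_courses({'alice': []}): A returns '', B returns 'alice'
import Mathlib
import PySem

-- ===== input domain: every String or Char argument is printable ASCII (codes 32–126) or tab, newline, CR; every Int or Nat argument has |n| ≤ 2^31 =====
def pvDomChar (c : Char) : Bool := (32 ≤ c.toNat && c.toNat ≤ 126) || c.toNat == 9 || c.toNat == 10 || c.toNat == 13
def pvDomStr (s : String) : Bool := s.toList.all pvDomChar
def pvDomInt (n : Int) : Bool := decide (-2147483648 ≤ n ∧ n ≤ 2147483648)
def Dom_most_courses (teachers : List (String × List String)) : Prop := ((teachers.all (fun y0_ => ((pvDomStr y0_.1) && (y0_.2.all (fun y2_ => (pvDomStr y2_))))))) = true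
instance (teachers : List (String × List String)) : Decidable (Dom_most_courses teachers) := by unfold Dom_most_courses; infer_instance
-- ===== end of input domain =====

-- B replaces A's running-max scan by a stable sort of the items by descending course count and taking the head; same result on Pre_, different algorithm, no speed claim.
-- ===== PORT A =====
def most_courses (teachers : List (String × List String)) : String :=
  (teachers.foldl
    (fun acc item => if item.2.length > acc.1 then (item.2.length, item.1) else acc)
    ((0 : Nat), "")).2

-- ===== PORT B =====
def most_courses_alt (teachers : List (String × List String)) : String :=
  let ranked := PySem.List.sorted teachers (fun kv => kv.2.length) true
  match ranked with
  | [] => ""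
  | kv :: _ => kv.1

-- ===== PRECONDITION & SPEC =====
-- Pre_ excludes nonempty dicts whose course lists are ALL empty: there A's "" sentinel
-- (max_count starts at 0 with strict >) and B's first-inserted teacher are both defensible.
def Pre_most_courses (teachers : List (String × List String)) : Prop :=
  teachers = [] ∨ ∃ p ∈ teachers, p.2 ≠ []
instance (teachers : List (String × List String)) : Decidable (Pre_most_courses teachers) := by
  unfold Pre_most_courses; infer_instance
def pvWitness_most_courses : (List (String × List String)) := [("alice", ["math"])]

def Spec_most_courses (teachers : List (String × List String)) (out : String) : Prop := out = most_courses_alt teachers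
instance (teachers : List (String × List String)) (out : String) : Decidable (Spec_most_courses teachers out) := by unfold Spec_most_courses; infer_instance

-- ===== CLAIM (what is proved, stated in full; the proofs are below) =====
def Claim_equal_most_courses : Prop := ∀ (teachers : List (String × List String)), Dom_most_courses teachers → Pre_most_courses teachers → Spec_most_courses teachers (most_courses teachers)

-- ===== LEMMAS AND PROOFS =====

-- "keep the earlier element unless a strictly longer one comes": the common core of both programs
def pvStep2 (m x : String × List String) : String × List String :=
  if m.2.length < x.2.length then x else m

theorem pvStep2_len_le (xs : List (String × List String)) (m : String × List String) :
    m.2.length ≤ (xs.foldl pvStep2 m).2.length := by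
  induction xs generalizing m with
  | nil => simp
  | cons x xs ih =>
    have := ih (pvStep2 m x)
    have hx : m.2.length ≤ (pvStep2 m x).2.length := by
      unfold pvStep2; split <;> omega
    simpa using le_trans hx this

theorem pvStep2_mem_le (xs : List (String × List String)) (m : String × List String)
    (x : String × List String) (hx : x ∈ xs) :
    x.2.length ≤ (xs.foldl pvStep2 m).2.length := by
  induction xs generalizing m with
  | nil => simp at hx
  | cons y ys ih =>
    rcases List.mem_cons.mp hx with h | h
    · subst h
      have h1 : x.2.length ≤ (pvStep2 m x).2.length := by
        unfold pvStep2; split <;> omega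
      simpa using le_trans h1 (pvStep2_len_le ys (pvStep2 m x))
    · simpa using ih (pvStep2 m y) h

-- A's fold seeded with a real element computes pvStep2's result
theorem pvA_of_some (xs : List (String × List String)) (m : String × List String) :
    xs.foldl (fun acc item => if item.2.length > acc.1 then (item.2.length, item.1) else acc)
      (m.2.length, m.1)
    = ((xs.foldl pvStep2 m).2.length, (xs.foldl pvStep2 m).1) := by
  induction xs generalizing m with
  | nil => simp
  | cons x xs ih =>
    simp only [List.foldl_cons]
    have hstep : (if x.2.length > m.2.length then (x.2.length, x.1) else (m.2.length, m.1))
        = ((pvStep2 m x).2.length, (pvStep2 m x).1) := by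
      unfold pvStep2; split_ifs with h1 <;> rfl
    rw [hstep, ih]

-- A's fold seeded with the (0,"") sentinel, when the seed-equivalent element has no courses
theorem pvA_of_zero (xs : List (String × List String)) (m : String × List String)
    (hm : m.2.length = 0) :
    xs.foldl (fun acc item => if item.2.length > acc.1 then (item.2.length, item.1) else acc)
      ((0 : Nat), "")
    = (if (xs.foldl pvStep2 m).2.length = 0 then ((0 : Nat), "")
       else ((xs.foldl pvStep2 m).2.length, (xs.foldl pvStep2 m).1)) := by
  induction xs generalizing m with
  | nil => simp [hm]
  | cons x xs ih =>
    simp only [List.foldl_cons]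
    by_cases hx : x.2.length > 0
    · have h1 : (if x.2.length > 0 then (x.2.length, x.1) else ((0:Nat), "")) = (x.2.length, x.1) := by
        simp [hx]
      have h2 : pvStep2 m x = x := by
        unfold pvStep2
        have hlt : m.2.length < x.2.length := by omega
        simp [hlt]
      rw [h1, h2, pvA_of_some]
      have := pvStep2_len_le xs x
      have hpos : (xs.foldl pvStep2 x).2.length ≠ 0 := by omega
      simp [hpos]
    · have hx0 : x.2.length = 0 := by omega
      have h1 : (if x.2.length > 0 then (x.2.length, x.1) else ((0:Nat), "")) = ((0:Nat), "") := by
        simp [hx0]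
      have h2 : pvStep2 m x = m := by unfold pvStep2; simp [hm, hx0]
      rw [h1, h2, ih m hm]

-- head of a reverse-stable insertion: the incoming element wins only on a strictly larger key
theorem pvHead_insertBy (x : String × List String) (acc : List (String × List String)) :
    (PySem.List.insertBy (fun a b => decide (b.2.length < a.2.length)) x acc).head?
    = (match acc.head? with
       | none => some x
       | some y => if y.2.length < x.2.length then some x else some y) := by
  cases acc with
  | nil => simp [PySem.List.insertBy]
  | cons y ys =>
    by_cases h : y.2.length < x.2.length <;>
      simp [PySem.List.insertBy, h]

-- head of the whole insertion-sort fold = first-max fold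
theorem pvHead_foldl_ins (xs : List (String × List String)) (acc : List (String × List String)) :
    (xs.foldl (fun acc x => PySem.List.insertBy (fun a b => decide (b.2.length < a.2.length)) x acc) acc).head?
    = xs.foldl (fun h x => match h with
        | none => some x
        | some m => if m.2.length < x.2.length then some x else some m) acc.head? := by
  induction xs generalizing acc with
  | nil => rfl
  | cons x xs ih =>
    simp only [List.foldl_cons]
    rw [ih, pvHead_insertBy]

theorem pvG_some (xs : List (String × List String)) (m : String × List String) :
    xs.foldl (fun h x => match h with
        | none => some x
        | some m => if m.2.length < x.2.length then some x else some m) (some m)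
    = some (xs.foldl pvStep2 m) := by
  induction xs generalizing m with
  | nil => rfl
  | cons x xs ih =>
    simp only [List.foldl_cons]
    have hx : (if m.2.length < x.2.length then some x else some m) = some (pvStep2 m x) := by
      by_cases h : m.2.length < x.2.length <;> simp [pvStep2, h]
    show List.foldl _ (if m.2.length < x.2.length then some x else some m) xs = _
    rw [hx, ih]

theorem pvSortedHead (m : String × List String) (rest : List (String × List String)) :
    (PySem.List.sorted (m :: rest) (fun kv => kv.2.length) true).head?
    = some (rest.foldl pvStep2 m) := by
  rw [PySem.List.sorted_rev_eq_foldl_insertBy, pvHead_foldl_ins]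
  simp only [List.foldl_cons, List.head?_nil]
  exact pvG_some rest m

-- ===== VERDICT (by name: the statement is the Claim_ definition above) =====
theorem most_courses_spec : Claim_equal_most_courses := by
  intro teachers _ hpre
  unfold Spec_most_courses most_courses most_courses_alt
  cases teachers with
  | nil => rfl
  | cons m rest =>
    rcases hpre with h | ⟨p, hp, hpne⟩
    · exact absurd h (by simp)
    -- the overall best has a positive course count
    set r := rest.foldl pvStep2 m with hr
    have hrpos : 0 < r.2.length := by
      have hplen : 0 < p.2.length := List.length_pos_iff.mpr hpne
      rcases List.mem_cons.mp hp with h | h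
      · subst h; exact lt_of_lt_of_le hplen (pvStep2_len_le rest p)
      · exact lt_of_lt_of_le hplen (pvStep2_mem_le rest m p h)
    -- B side: head of the sorted list is r
    have hB : (PySem.List.sorted (m :: rest) (fun kv => kv.2.length) true) = r :: (PySem.List.sorted (m :: rest) (fun kv => kv.2.length) true).tail := by
      have h1 := pvSortedHead m rest
      cases hs : PySem.List.sorted (m :: rest) (fun kv => kv.2.length) true with
      | nil => rw [hs] at h1; simp at h1
      | cons a t => rw [hs] at h1; simp at h1; simp [h1, hr]
    -- A side
    simp only [List.foldl_cons]
    by_cases hm : m.2.length > 0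
    · have h1 : (if m.2.length > 0 then (m.2.length, m.1) else ((0:Nat), "")) = (m.2.length, m.1) := by
        simp [hm]
      rw [h1, pvA_of_some, hB]
    · have hm0 : m.2.length = 0 := by omega
      have h1 : (if m.2.length > 0 then (m.2.length, m.1) else ((0:Nat), "")) = ((0:Nat), "") := by
        simp [hm0]
      rw [h1, pvA_of_zero rest m hm0, hB, ← hr]
      have hne : r.2 ≠ [] := by
        intro h; rw [h] at hrpos; simp at hrpos
      simp [hne]
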